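-- pv_equiv track=rewrite | github.com/Hansk1/OhjelmoinninPerusteet | L13T3.py | analysoi
-- ===== SOURCE A (Python) =====
-- def analysoi(DataLista, ViikonpaivienLukumaarat):
--     for i in DataLista:
--         Data = i.split(",")
--         if Data[0] == "Monday":
--             ViikonpaivienLukumaarat["Monday"] = ViikonpaivienLukumaarat["Monday"] + 1
--         elif Data[0] == "Tuesday":
--             ViikonpaivienLukumaarat["Tuesday"] = ViikonpaivienLukumaarat["Tuesday"] + 1
--         elif Data[0] == "Wednesday":
--             ViikonpaivienLukumaarat["Wednesday"] = ViikonpaivienLukumaarat["Wednesday"] + 1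
--         elif Data[0] == "Thursday":
--             ViikonpaivienLukumaarat["Thursday"] = ViikonpaivienLukumaarat["Thursday"] + 1
--         elif Data[0] == "Friday":
--             ViikonpaivienLukumaarat["Friday"] = ViikonpaivienLukumaarat["Friday"] + 1
--         elif Data[0] == "Saturday":
--             ViikonpaivienLukumaarat["Saturday"] = ViikonpaivienLukumaarat["Saturday"] + 1
--         elif Data[0] == "Sunday":
--             ViikonpaivienLukumaarat["Sunday"] = ViikonpaivienLukumaarat["Sunday"] + 1
--
--     return ViikonpaivienLukumaarat
-- ===== SOURCE B (Python) =====
-- def analysoi(DataLista, ViikonpaivienLukumaarat):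
--     # Tally first fields once, then merge per weekday into the dict.
--     counts = {}
--     for row in DataLista:
--         day = row.split(",")[0]
--         counts[day] = counts.get(day, 0) + 1
--     for day in ("Monday", "Tuesday", "Wednesday", "Thursday",
--                 "Friday", "Saturday", "Sunday"):
--         if counts.get(day):
--             ViikonpaivienLukumaarat[day] += counts[day]
--     return ViikonpaivienLukumaarat
-- ===== Notes on version B (the rewrite author's own statement) =====
-- stated objective: alternative
-- what changed: B builds a frequency table of the rows' first comma-fields in one pass and then merges it into the dict with a second pass over the fixed seven-day list, instead of A's per-row chained elif increments.
import Mathlib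
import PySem

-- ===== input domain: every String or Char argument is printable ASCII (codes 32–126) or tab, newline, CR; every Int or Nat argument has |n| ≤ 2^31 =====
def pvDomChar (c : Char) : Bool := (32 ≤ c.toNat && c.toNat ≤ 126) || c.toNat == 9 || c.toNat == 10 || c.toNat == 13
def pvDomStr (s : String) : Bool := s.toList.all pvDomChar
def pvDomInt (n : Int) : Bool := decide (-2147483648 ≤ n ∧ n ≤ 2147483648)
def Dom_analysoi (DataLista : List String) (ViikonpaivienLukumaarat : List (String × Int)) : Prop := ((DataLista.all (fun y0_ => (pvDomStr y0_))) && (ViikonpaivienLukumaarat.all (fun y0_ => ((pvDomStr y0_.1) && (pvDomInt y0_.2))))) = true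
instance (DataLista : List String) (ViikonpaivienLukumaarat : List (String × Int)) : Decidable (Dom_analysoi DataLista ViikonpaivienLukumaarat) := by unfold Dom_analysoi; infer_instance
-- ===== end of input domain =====

-- B tallies the first fields once into a counter and merges per weekday afterwards, instead of A's
-- per-row chained-elif increments (alternative decomposition; A mutates the dict in place in Python,
-- the equivalence proved here is about the returned value).


-- ===== PORT A =====
-- ViikonpaivienLukumaarat[k] = ViikonpaivienLukumaarat[k] + 1 ; Python raises KeyError when k is absent (excluded by Pre_)
def pvBumpA (d : PySem.Dict String Int) (k : String) : PySem.Dict String Int :=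
  match d.get? k with
  | some v => d.insert k (v + 1)
  | none => d

-- the loop body of A (Data[0] via headD "": split with a nonempty separator never returns [])
def pvStepA (d : PySem.Dict String Int) (i : String) : PySem.Dict String Int :=
  let Data := ((PySem.Str.split? i ",").getD [])
  if Data.headD "" = "Monday" then pvBumpA d "Monday"
  else if Data.headD "" = "Tuesday" then pvBumpA d "Tuesday"
  else if Data.headD "" = "Wednesday" then pvBumpA d "Wednesday"
  else if Data.headD "" = "Thursday" then pvBumpA d "Thursday"
  else if Data.headD "" = "Friday" then pvBumpA d "Friday"
  else if Data.headD "" = "Saturday" then pvBumpA d "Saturday"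
  else if Data.headD "" = "Sunday" then pvBumpA d "Sunday"
  else d

def analysoi (DataLista : List String) (ViikonpaivienLukumaarat : List (String × Int)) : List (String × Int) :=
  (DataLista.foldl pvStepA (PySem.Dict.mk ViikonpaivienLukumaarat)).items

-- ===== PORT B =====
def pvDays : List String := ["Monday", "Tuesday", "Wednesday", "Thursday", "Friday", "Saturday", "Sunday"]

-- ViikonpaivienLukumaarat[k] += n ; Python raises KeyError when k is absent (excluded by Pre_)
def pvAddN (d : PySem.Dict String Int) (k : String) (n : Int) : PySem.Dict String Int :=
  match d.get? k with
  | some v => d.insert k (v + n)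
  | none => d

def analysoi_alt (DataLista : List String) (ViikonpaivienLukumaarat : List (String × Int)) : List (String × Int) :=
  let counts := DataLista.foldl
    (fun c row => c.insert ((((PySem.Str.split? row ",").getD [])).headD "")
                           (c.getD ((((PySem.Str.split? row ",").getD [])).headD "") 0 + 1))
    PySem.Dict.empty
  (pvDays.foldl
    (fun d day => if counts.getD day 0 ≠ 0 then pvAddN d day (counts.getD day 0) else d)
    (PySem.Dict.mk ViikonpaivienLukumaarat)).items

-- ===== PRECONDITION & SPEC =====
-- Pre_ excludes exactly the inputs on which the Python raises KeyError (a weekday name occurs as some row's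
-- first comma-field but is not a key of the dict); the Nodup conjunct only rules out duplicate keys, which
-- a Python dict cannot contain.
def Pre_analysoi (DataLista : List String) (ViikonpaivienLukumaarat : List (String × Int)) : Prop :=
  (ViikonpaivienLukumaarat.map Prod.fst).Nodup ∧
  ∀ row ∈ DataLista, (((PySem.Str.split? row ",").getD [])).headD "" ∈ pvDays →
    (((PySem.Str.split? row ",").getD [])).headD "" ∈ ViikonpaivienLukumaarat.map Prod.fst

instance (DataLista : List String) (ViikonpaivienLukumaarat : List (String × Int)) : Decidable (Pre_analysoi DataLista ViikonpaivienLukumaarat) := by unfold Pre_analysoi; infer_instance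

def pvWitness_analysoi : List String × (List (String × Int)) :=
  (["Monday,5", "Funday", "Monday"], [("Monday", 3), ("x", 0)])

def Spec_analysoi (DataLista : List String) (ViikonpaivienLukumaarat : List (String × Int)) (out : List (String × Int)) : Prop := out = analysoi_alt DataLista ViikonpaivienLukumaarat
instance (DataLista : List String) (ViikonpaivienLukumaarat : List (String × Int)) (out : List (String × Int)) : Decidable (Spec_analysoi DataLista ViikonpaivienLukumaarat out) := by unfold Spec_analysoi; infer_instance

-- ===== CLAIM (what is proved, stated in full; the proofs are below) =====
def Claim_equal_analysoi : Prop := ∀ (DataLista : List String) (ViikonpaivienLukumaarat : List (String × Int)), Dom_analysoi DataLista ViikonpaivienLukumaarat → Pre_analysoi DataLista ViikonpaivienLukumaarat → Spec_analysoi DataLista ViikonpaivienLukumaarat (analysoi DataLista ViikonpaivienLukumaarat)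

-- ===== LEMMAS AND PROOFS =====
-- first comma-field of a row
def pvFF (r : String) : String := (((PySem.Str.split? r ",").getD [])).headD ""

lemma pvStepA_char (d : PySem.Dict String Int) (i : String) :
    pvStepA d i = if pvFF i ∈ pvDays then pvAddN d (pvFF i) 1 else d := by
  have hb : ∀ k, pvBumpA d k = pvAddN d k 1 := fun _ => rfl
  simp only [pvStepA, pvFF, pvDays, List.mem_cons, List.not_mem_nil, or_false, hb]
  split_ifs <;> simp_all

lemma pv_contains_of_get? {d : PySem.Dict String Int} {k : String} {v : Int}
    (h : d.get? k = some v) : d.contains k = true := by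
  cases hc : d.contains k
  · rw [← PySem.Dict.get?_eq_none_iff_contains] at hc; simp [hc] at h
  · rfl

lemma pvAddN_keys (d : PySem.Dict String Int) (k : String) (n : Int) :
    (pvAddN d k n).keys = d.keys := by
  unfold pvAddN
  cases h : d.get? k with
  | none => rfl
  | some v => exact PySem.Dict.keys_insert_of_contains d _ (pv_contains_of_get? h)

lemma pvAddN_items (d : PySem.Dict String Int) (k : String) (n : Int)
    (hN : d.keys.Nodup) (hc : k ∈ d.keys) :
    (pvAddN d k n).items = d.items.map (fun p => (p.1, p.2 + if p.1 = k then n else 0)) := by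
  rw [← PySem.Dict.contains_iff_mem_keys] at hc
  obtain ⟨v, hv⟩ : ∃ v, d.get? k = some v := by
    cases h : d.get? k with
    | none => rw [PySem.Dict.get?_eq_none_iff_contains] at h; simp [h] at hc
    | some v => exact ⟨v, rfl⟩
  unfold pvAddN
  rw [hv]
  show (d.insert k (v + n)).items = _
  rw [PySem.Dict.items_insert_of_contains d _ hc]
  apply List.map_congr_left
  intro p hp
  by_cases hk : p.1 = k
  · have := PySem.Dict.get?_of_mem_items d (k := p.1) (v := p.2) (by simpa using hp) hN
    rw [hk, hv] at this
    have hv2 : v = p.2 := Option.some_inj.mp this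
    simp [hk, ← hv2]
  · simp [hk]

lemma foldA_items (rows : List String) (d : PySem.Dict String Int)
    (hN : d.keys.Nodup)
    (hPre : ∀ r ∈ rows, pvFF r ∈ pvDays → pvFF r ∈ d.keys) :
    (rows.foldl pvStepA d).items
      = d.items.map (fun p => (p.1, p.2 + if p.1 ∈ pvDays then (((rows.map pvFF).count p.1 : Nat) : Int) else 0)) := by
  induction rows generalizing d with
  | nil => simp
  | cons r rows ih =>
      rw [List.foldl_cons, pvStepA_char]
      by_cases hm : pvFF r ∈ pvDays
      · have hk : pvFF r ∈ d.keys := hPre r (by simp) hm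
        rw [if_pos hm]
        rw [ih (pvAddN d (pvFF r) 1) (by rw [pvAddN_keys]; exact hN)
              (fun s hs h2 => by rw [pvAddN_keys]; exact hPre s (by simp [hs]) h2)]
        rw [pvAddN_items d (pvFF r) 1 hN hk, List.map_map]
        apply List.map_congr_left
        intro p _
        simp only [Function.comp]
        by_cases hd : p.1 ∈ pvDays
        · by_cases he : p.1 = pvFF r
          · simp only [he, if_pos, List.map_cons, List.count_cons, beq_self_eq_true]
            push_cast
            simp only [if_pos hm, Prod.mk.injEq, true_and]
            ring
          · simp only [hd, he, if_false, if_true, List.map_cons, List.count_cons,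
              beq_iff_eq, add_zero]
            simp only [Prod.mk.injEq, true_and, add_right_inj]
            simp [Ne.symm he]
        · have hne : p.1 ≠ pvFF r := fun h => hd (h ▸ hm)
          simp [hd, hne]
      · rw [if_neg hm]
        rw [ih d hN (fun s hs h2 => hPre s (by simp [hs]) h2)]
        apply List.map_congr_left
        intro p _
        by_cases hd : p.1 ∈ pvDays
        · have hne : p.1 ≠ pvFF r := fun h => hm (h ▸ hd)
          simp [hd, Ne.symm hne]
        · simp [hd]

lemma foldB_items (c : String → Int) (ds : List String) (d : PySem.Dict String Int)
    (hnd : ds.Nodup) (hN : d.keys.Nodup)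
    (hPre : ∀ day ∈ ds, c day ≠ 0 → day ∈ d.keys) :
    (ds.foldl (fun d day => if c day ≠ 0 then pvAddN d day (c day) else d) d).items
      = d.items.map (fun p => (p.1, p.2 + if p.1 ∈ ds then c p.1 else 0)) := by
  induction ds generalizing d with
  | nil => simp
  | cons day ds ih =>
      have hnotin : day ∉ ds := (List.nodup_cons.mp hnd).1
      rw [List.foldl_cons]
      by_cases hz : c day ≠ 0
      · have hk : day ∈ d.keys := hPre day (by simp) hz
        rw [if_pos hz]
        rw [ih (pvAddN d day (c day)) (List.nodup_cons.mp hnd).2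
              (by rw [pvAddN_keys]; exact hN)
              (fun s hs h2 => by rw [pvAddN_keys]; exact hPre s (by simp [hs]) h2)]
        rw [pvAddN_items d day (c day) hN hk, List.map_map]
        apply List.map_congr_left
        intro p _
        simp only [Function.comp]
        by_cases he : p.1 = day
        · simp [he]
          exact fun h => absurd h hnotin
        · simp [he, Ne.symm he]
      · rw [if_neg hz]
        rw [ih d (List.nodup_cons.mp hnd).2 hN (fun s hs h2 => hPre s (by simp [hs]) h2)]
        apply List.map_congr_left
        intro p _
        by_cases he : p.1 = day
        · rw [not_not] at hz
          have : p.1 ∉ ds := he ▸ hnotin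
          simp [he, hz]
        · simp [he, Ne.symm he]

-- ===== VERDICT (by name: the statement is the Claim_ definition above) =====
theorem analysoi_spec : Claim_equal_analysoi := by
  intro rows V _ hPre
  obtain ⟨hNodup, hPre2⟩ := hPre
  unfold Spec_analysoi analysoi analysoi_alt
  have hkN : (PySem.Dict.mk V).keys.Nodup := by rw [PySem.Dict.keys_mk]; exact hNodup
  have hkeys : (PySem.Dict.mk V).keys = V.map Prod.fst := PySem.Dict.keys_mk V
  have hc : ∀ day,
      (rows.foldl (fun c row => c.insert ((((PySem.Str.split? row ",").getD [])).headD "")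
          (c.getD ((((PySem.Str.split? row ",").getD [])).headD "") 0 + 1))
        PySem.Dict.empty).getD day 0 = (((rows.map pvFF).count day : Nat) : Int) := by
    intro day
    have hfused : (rows.map pvFF).foldl (fun c x => c.insert x (c.getD x 0 + 1))
          (PySem.Dict.empty : PySem.Dict String Int)
        = rows.foldl (fun c row => c.insert ((((PySem.Str.split? row ",").getD [])).headD "")
            (c.getD ((((PySem.Str.split? row ",").getD [])).headD "") 0 + 1))
            (PySem.Dict.empty : PySem.Dict String Int) := by
      rw [List.foldl_map]
      rfl
    rw [← hfused, PySem.Dict.getD_foldl_insert_add_one]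
    simp
  show (rows.foldl pvStepA (PySem.Dict.mk V)).items = _
  rw [foldA_items rows (PySem.Dict.mk V) hkN
        (fun r hr hm => by rw [hkeys]; exact hPre2 r hr hm)]
  rw [foldB_items _ pvDays (PySem.Dict.mk V) (by decide) hkN
        (fun day hday hz => by
          rw [hkeys]
          rw [hc day] at hz
          have : day ∈ rows.map pvFF := by
            by_contra hmem
            exact hz (by simp [List.count_eq_zero_of_not_mem hmem])
          obtain ⟨r, hr, hfr⟩ := List.mem_map.mp this
          have h1 : pvFF r ∈ pvDays := hfr ▸ hday
          have h2 : pvFF r ∈ List.map Prod.fst V := hPre2 r hr h1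
          exact hfr ▸ h2)]
  apply List.map_congr_left
  intro p _
  by_cases hd : p.1 ∈ pvDays
  · simp only [if_pos hd, Prod.mk.injEq, true_and, add_right_inj]
    exact (hc p.1).symm
  · simp [hd]
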